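-- pv_equiv track=rewrite | github.com/pawles-st/algebra | problem6/program.py | min_elem
-- ===== SOURCE A (Python) =====
-- def min_elem(A):
--     M = set()
--
--     def compare(x, y):
--         for (a, b) in zip(x, y):
--             if a > b:
--                 return False
--         return True
--
--     for a in A:
--         minimum = True
--         invalidated = set()
--         for m in M:
--             if compare(m, a):
--                 minimum = False
--             elif compare(a, m):
--                 invalidated.add(m)
--         if minimum:
--             M.add(a)
--         M = M - invalidated
--     return M
-- ===== SOURCE B (Python) =====
-- def min_elem(A):
--     S = set(A)
--     return {a for a in S
--             if not any(b != a and all(x <= y for x, y in zip(b, a)) for b in S)}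
-- ===== Notes on version B (the rewrite author's own statement) =====
-- stated objective: simpler
-- what changed: Replaces the incrementally maintained set M with its minimum flag and invalidated-set pruning by a single declarative filter: keep a iff no other element of set(A) dominates it pointwise.
import Mathlib
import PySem

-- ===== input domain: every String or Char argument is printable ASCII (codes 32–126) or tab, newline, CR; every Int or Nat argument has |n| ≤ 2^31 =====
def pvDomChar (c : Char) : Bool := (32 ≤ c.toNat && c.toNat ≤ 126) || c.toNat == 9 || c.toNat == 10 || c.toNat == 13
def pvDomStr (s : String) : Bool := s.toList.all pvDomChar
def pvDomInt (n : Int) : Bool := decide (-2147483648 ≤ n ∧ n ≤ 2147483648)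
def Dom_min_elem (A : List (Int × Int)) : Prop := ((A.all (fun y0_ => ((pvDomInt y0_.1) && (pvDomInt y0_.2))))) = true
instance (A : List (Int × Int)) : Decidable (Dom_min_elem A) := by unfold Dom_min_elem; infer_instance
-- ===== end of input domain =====

-- B replaces A's incrementally pruned set M (minimum flag + invalidated subtraction) by a single
-- declarative filter of set(A): keep a iff no other element dominates it pointwise. Objective: simpler.

-- ===== PORT A =====
-- compare(x, y): loop over zip(x, y), returning False as soon as a > b
def pyCompare (x y : Int × Int) : Bool :=
  (List.zip [x.1, x.2] [y.1, y.2]).all (fun p => !(p.1 > p.2))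

-- body of the inner 'for m in M' loop: state (minimum, invalidated)
def minElemInner (a : Int × Int) (p : Bool × PySem.Set (Int × Int)) (m : Int × Int) :
    Bool × PySem.Set (Int × Int) :=
  if pyCompare m a then (false, p.2)
  else if pyCompare a m then (p.1, PySem.Set.add p.2 m)
  else p

-- body of the outer 'for a in A' loop
def minElemStep (M : PySem.Set (Int × Int)) (a : Int × Int) : PySem.Set (Int × Int) :=
  let st := M.foldl (minElemInner a) (true, PySem.Set.empty)
  let M' := if st.1 then PySem.Set.add M a else M
  PySem.Set.diff M' st.2

def min_elem (A : List (Int × Int)) : List (Int × Int) :=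
  A.foldl minElemStep PySem.Set.empty

-- ===== PORT B =====
-- all(x <= y for x, y in zip(b, a))
def altDominates (b a : Int × Int) : Bool :=
  (List.zip [b.1, b.2] [a.1, a.2]).all (fun p => p.1 ≤ p.2)

def min_elem_alt (A : List (Int × Int)) : List (Int × Int) :=
  let S := PySem.Set.ofList A
  S.filter (fun a => ! S.any (fun b => decide (b ≠ a) && altDominates b a))

-- ===== PRECONDITION & SPEC =====
def Spec_min_elem (A : List (Int × Int)) (out : List (Int × Int)) : Prop := out = min_elem_alt A
instance (A : List (Int × Int)) (out : List (Int × Int)) : Decidable (Spec_min_elem A out) := by unfold Spec_min_elem; infer_instance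

-- ===== CLAIM (what is proved, stated in full; the proofs are below) =====
def Claim_equal_min_elem : Prop := ∀ (A : List (Int × Int)), Dom_min_elem A → Spec_min_elem A (min_elem A)

-- ===== LEMMAS AND PROOFS =====

-- b survives the filter against history P: every c in P equals b or does not dominate b
def keepF (P : List (Int × Int)) (b : Int × Int) : Bool :=
  P.all (fun c => decide (c = b) || !pyCompare c b)

theorem pyCompare_iff (x y : Int × Int) : pyCompare x y = true ↔ x.1 ≤ y.1 ∧ x.2 ≤ y.2 := by
  simp [pyCompare]

theorem alt_eq_pyCompare (x y : Int × Int) : altDominates x y = pyCompare x y := by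
  rw [Bool.eq_iff_iff]; simp [altDominates, pyCompare]

theorem pyCompare_self (x : Int × Int) : pyCompare x x = true := by
  simp [pyCompare_iff]

theorem pyCompare_trans {x y z : Int × Int} (h1 : pyCompare x y = true)
    (h2 : pyCompare y z = true) : pyCompare x z = true := by
  rw [pyCompare_iff] at *; omega

theorem pyCompare_antisymm {x y : Int × Int} (h1 : pyCompare x y = true)
    (h2 : pyCompare y x = true) : x = y := by
  rw [pyCompare_iff] at *
  exact Prod.ext (le_antisymm h1.1 h2.1) (le_antisymm h1.2 h2.2)

theorem countP_strict_lt (p q : (Int × Int) → Bool) :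
    ∀ (l : List (Int × Int)), (∀ x ∈ l, p x = true → q x = true) →
      ∀ x ∈ l, q x = true → p x = false → l.countP p < l.countP q := by
  intro l
  induction l with
  | nil => intro _ x hx; cases hx
  | cons y l ih =>
    intro h x hx hqx hpx
    rw [List.countP_cons, List.countP_cons]
    rcases List.mem_cons.mp hx with rfl | hx
    · rw [hqx, hpx]
      have := List.countP_mono_left (l := l) (p := p) (q := q)
        (fun c hc => h c (List.mem_cons_of_mem _ hc))
      simp only [Bool.false_eq_true, if_true, if_false]
      omega
    · have hlt := ih (fun c hc hp => h c (List.mem_cons_of_mem _ hc) hp) x hx hqx hpx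
      have hyq := h y List.mem_cons_self
      cases hpy : p y <;> cases hqy : q y <;> simp_all
      omega

-- if some b ≠ a in P dominates a, then some SURVIVING (keepF) element of P dominates a
theorem min_witness (P : List (Int × Int)) (a : Int × Int) :
    ∀ (n : ℕ) (b : Int × Int),
      P.countP (fun c => pyCompare c b && !decide (c = b)) = n →
      b ∈ P → pyCompare b a = true → b ≠ a →
      ∃ m, m ∈ P ∧ keepF P m = true ∧ pyCompare m a = true ∧ m ≠ a := by
  intro n
  induction n using Nat.strong_induction_on with
  | _ n ih =>
    intro b hcount hb hba hne
    by_cases hk : keepF P b = true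
    · exact ⟨b, hb, hk, hba, hne⟩
    · have : ∃ c ∈ P, ¬(c = b ∨ ¬ pyCompare c b = true) := by
        simpa [keepF, List.all_eq_true, Decidable.not_imp_not] using hk
      obtain ⟨c, hc, hcb⟩ := this
      push Not at hcb
      obtain ⟨hcneb, hccb⟩ := hcb
      have hca : pyCompare c a = true := pyCompare_trans hccb hba
      have hcnea : c ≠ a := by
        intro h; subst h
        exact hne (pyCompare_antisymm hba hccb)
      have hlt : P.countP (fun d => pyCompare d c && !decide (d = c)) < n := by
        rw [← hcount]
        refine countP_strict_lt _ _ P ?_ c hc ?_ ?_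
        · intro d hd hdp
          simp only [Bool.and_eq_true, Bool.not_eq_true', decide_eq_false_iff_not] at hdp ⊢
          refine ⟨pyCompare_trans hdp.1 hccb, ?_⟩
          intro h; subst h
          exact hcneb (pyCompare_antisymm hccb hdp.1)
        · simp only [Bool.and_eq_true, Bool.not_eq_true', decide_eq_false_iff_not]
          exact ⟨hccb, hcneb⟩
        · simp [pyCompare_self]
      exact ih _ hlt c rfl hc hca hcnea

theorem inner_fst (a : Int × Int) (L : List (Int × Int)) :
    ∀ (b0 : Bool) (s0 : PySem.Set (Int × Int)),
      (L.foldl (minElemInner a) (b0, s0)).1 = (b0 && L.all (fun m => !pyCompare m a)) := by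
  induction L with
  | nil => simp
  | cons m L ih =>
    intro b0 s0
    simp only [List.foldl_cons, List.all_cons, minElemInner]
    split_ifs with h1 h2 <;> simp [ih, h1]

theorem inner_snd (a : Int × Int) (L : List (Int × Int)) :
    ∀ (b0 : Bool) (s0 : PySem.Set (Int × Int)),
      (L.foldl (minElemInner a) (b0, s0)).2 =
        L.foldl (fun s m => if !pyCompare m a && pyCompare a m then PySem.Set.add s m else s) s0 := by
  induction L with
  | nil => simp
  | cons m L ih =>
    intro b0 s0
    by_cases h1 : pyCompare m a = true
    · simp [List.foldl_cons, minElemInner, h1, ih]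
    · by_cases h2 : pyCompare a m = true
      · simp [List.foldl_cons, minElemInner, h1, h2, ih]
      · simp [List.foldl_cons, minElemInner, h1, h2, ih]

theorem fold_add_filter (q : (Int × Int) → Bool) (L : List (Int × Int)) :
    ∀ (s0 : PySem.Set (Int × Int)), L.Nodup → (∀ x ∈ L, x ∉ s0) →
      L.foldl (fun s m => if q m then PySem.Set.add s m else s) s0 = s0 ++ L.filter q := by
  induction L with
  | nil => simp
  | cons m L ih =>
    intro s0 hnd hdisj
    simp only [List.foldl_cons, List.filter_cons]
    rcases List.nodup_cons.mp hnd with ⟨hm, hnd'⟩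
    by_cases hq : q m = true
    · rw [if_pos hq, if_pos hq,
        PySem.Set.add_of_not_mem (hdisj m List.mem_cons_self),
        ih (s0 ++ [m]) hnd' ?_]
      · simp
      · intro x hx
        simp only [List.mem_append, List.mem_singleton]
        rintro (h | h)
        · exact hdisj x (List.mem_cons_of_mem _ hx) h
        · exact hm (h ▸ hx)
    · rw [if_neg (by simp [hq]), if_neg (by simp [hq]),
        ih s0 hnd' (fun x hx => hdisj x (List.mem_cons_of_mem _ hx))]

-- keepF against history P ++ [a] splits into keepF P and the new element's test
theorem keepF_append (P : List (Int × Int)) (a b : Int × Int) :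
    keepF (P ++ [a]) b = (keepF P b && (decide (b = a) || !pyCompare a b)) := by
  have : decide (a = b) = decide (b = a) := by simp [eq_comm]
  simp [keepF, List.all_append, this]

theorem keepF_iff (P : List (Int × Int)) (b : Int × Int) :
    keepF P b = true ↔ ∀ c ∈ P, c = b ∨ pyCompare c b = false := by
  simp [keepF, List.all_eq_true]

-- one outer-loop step preserves the invariant
theorem step_eq (P : List (Int × Int)) (a : Int × Int) :
    minElemStep ((PySem.Set.ofList P).filter (keepF P)) a
      = (PySem.Set.ofList (P ++ [a])).filter (keepF (P ++ [a])) := by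
  set D := PySem.Set.ofList P with hD
  set M := D.filter (keepF P) with hM
  have hMnd : M.Nodup := (PySem.Set.nodup_ofList P).filter _
  have hMmem : ∀ x, x ∈ M ↔ (x ∈ P ∧ keepF P x = true) := by
    intro x
    rw [hM, List.mem_filter, hD, PySem.Set.mem_ofList]
  -- the inner loop computes the minimum flag and the invalidated set
  have hfst : (M.foldl (minElemInner a) (true, PySem.Set.empty)).1
      = M.all (fun m => !pyCompare m a) := by
    rw [inner_fst]; simp
  have hsnd : (M.foldl (minElemInner a) (true, PySem.Set.empty)).2
      = M.filter (fun m => !pyCompare m a && pyCompare a m) := by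
    rw [inner_snd, fold_add_filter _ M PySem.Set.empty hMnd (by intro x _ hx; cases hx)]
    rfl
  have hdiff : ∀ (s t : PySem.Set (Int × Int)),
      PySem.Set.diff s t = s.filter (fun x => !(PySem.Set.contains t x)) := by
    intro s t; simp [PySem.Set.diff]
  have hInv : ∀ x, (PySem.Set.contains (M.filter (fun m => !pyCompare m a && pyCompare a m)) x = true)
      ↔ (x ∈ M ∧ pyCompare x a = false ∧ pyCompare a x = true) := by
    intro x
    rw [PySem.Set.contains_iff, List.mem_filter]
    simp
  rw [PySem.Set.ofList_append_singleton]
  unfold minElemStep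
  show PySem.Set.diff
      (if (M.foldl (minElemInner a) (true, PySem.Set.empty)).1 = true
        then PySem.Set.add M a else M)
      (M.foldl (minElemInner a) (true, PySem.Set.empty)).2 = _
  rw [hfst, hsnd, hdiff]
  by_cases hmin : M.all (fun m => !pyCompare m a) = true
  · -- minimum stayed True: no element of M dominates a
    have hnodom : ∀ m ∈ M, pyCompare m a = false := by
      intro m hm
      have := List.all_eq_true.mp hmin m hm
      simpa using this
    -- hence nothing in P other than a itself dominates a
    have hnoP : ∀ b ∈ P, b ≠ a → pyCompare b a = false := by
      intro b hb hbne
      by_contra hcmp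
      have hcmp' : pyCompare b a = true := by
        cases h : pyCompare b a
        · exact absurd h hcmp
        · rfl
      obtain ⟨m, hmP, hmk, hma, -⟩ := min_witness P a _ b rfl hb hcmp' hbne
      have : m ∈ M := (hMmem m).mpr ⟨hmP, hmk⟩
      rw [hnodom m this] at hma
      cases hma
    -- and a is not in P
    have haP : a ∉ P := by
      intro haP
      by_cases hka : keepF P a = true
      · have : a ∈ M := (hMmem a).mpr ⟨haP, hka⟩
        have := hnodom a this
        rw [pyCompare_self] at this
        cases this
      · have : ∃ c ∈ P, ¬(c = a ∨ pyCompare c a = false) := by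
          simpa [keepF_iff, Decidable.not_imp_not] using hka
        obtain ⟨c, hc, hcc⟩ := this
        push Not at hcc
        rw [hnoP c hc hcc.1] at hcc
        exact hcc.2 rfl
    have haD : a ∉ D := by rw [hD, PySem.Set.mem_ofList]; exact haP
    have haM : a ∉ M := fun h => haP ((hMmem a).mp h).1
    rw [if_pos hmin, PySem.Set.add_of_not_mem haM, PySem.Set.add_eq_ite, if_neg haD,
      List.filter_append, List.filter_append]
    have h1 : M.filter (fun x => !(PySem.Set.contains (M.filter (fun m => !pyCompare m a && pyCompare a m)) x))
        = M.filter (fun x => !pyCompare a x) := by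
      apply List.filter_congr
      intro x hx
      rw [Bool.eq_iff_iff]
      simp only [Bool.not_eq_true', ← Bool.not_eq_true]
      rw [not_iff_not, hInv]
      constructor
      · rintro ⟨-, -, h⟩; exact h
      · intro h; exact ⟨hx, hnodom x hx, h⟩
    have h2 : List.filter (fun x => !(PySem.Set.contains (M.filter (fun m => !pyCompare m a && pyCompare a m)) x)) [a] = [a] := by
      have : PySem.Set.contains (M.filter (fun m => !pyCompare m a && pyCompare a m)) a = false := by
        cases h : PySem.Set.contains (M.filter (fun m => !pyCompare m a && pyCompare a m)) a
        · rfl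
        · exact absurd ((hInv a).mp h).1 haM
      simp [List.filter]
    have h3 : List.filter (keepF (P ++ [a])) [a] = [a] := by
      have : keepF (P ++ [a]) a = true := by
        rw [keepF_iff]
        intro c hc
        rcases List.mem_append.mp hc with hc | hc
        · by_cases hca : c = a
          · exact Or.inl hca
          · exact Or.inr (hnoP c hc hca)
        · rw [List.mem_singleton] at hc
          exact Or.inl hc
      simp [List.filter, this]
    have h4 : D.filter (keepF (P ++ [a])) = M.filter (fun x => !pyCompare a x) := by
      rw [hM, List.filter_filter]
      apply List.filter_congr
      intro b hb
      have hbP : b ∈ P := by rw [hD, PySem.Set.mem_ofList] at hb; exact hb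
      have hbne : b ≠ a := fun h => haP (h ▸ hbP)
      rw [keepF_append]
      cases hk : keepF P b <;> cases hc : pyCompare a b <;> simp [hbne]
    rw [h1, h2, h3, h4]
  · -- minimum became False: a is dominated by some element of M
    have hdom : ∃ m ∈ M, pyCompare m a = true := by
      have : ∃ m ∈ M, ¬(!pyCompare m a) = true := by
        simpa [List.all_eq_true, Decidable.not_imp_not] using hmin
      obtain ⟨m, hm, hmc⟩ := this
      exact ⟨m, hm, by simpa using hmc⟩
    rw [if_neg hmin]
    have h1 : M.filter (fun x => !(PySem.Set.contains (M.filter (fun m => !pyCompare m a && pyCompare a m)) x))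
        = M.filter (fun x => decide (x = a) || !pyCompare a x) := by
      apply List.filter_congr
      intro x hx
      by_cases hxa : x = a
      · have hc : PySem.Set.contains (M.filter (fun m => !pyCompare m a && pyCompare a m)) x = false := by
          cases h : PySem.Set.contains (M.filter (fun m => !pyCompare m a && pyCompare a m)) x
          · rfl
          · obtain ⟨-, h1, -⟩ := (hInv x).mp h
            simp [hxa, pyCompare_self] at h1
        simp [hxa]
      · rw [Bool.eq_iff_iff]
        simp only [Bool.not_eq_true', ← Bool.not_eq_true, Bool.or_eq_true, decide_eq_true_eq]
        rw [hInv]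
        constructor
        · intro hncon
          cases hax : pyCompare a x
          · exact Or.inr (by simp)
          · cases hxA : pyCompare x a
            · exact absurd ⟨hx, hxA, hax⟩ hncon
            · exact absurd (pyCompare_antisymm hxA hax) hxa
        · rintro (h | h) ⟨-, -, hax⟩
          · exact hxa h
          · exact h hax
    have h2 : M.filter (fun x => decide (x = a) || !pyCompare a x) = D.filter (keepF (P ++ [a])) := by
      rw [hM, List.filter_filter]
      apply List.filter_congr
      intro b _
      rw [keepF_append, Bool.and_comm]
    rw [h1, h2, PySem.Set.add_eq_ite]
    by_cases haD : a ∈ D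
    · rw [if_pos haD]
    · rw [if_neg haD, List.filter_append]
      have haP : a ∉ P := by rw [hD, PySem.Set.mem_ofList] at haD; exact haD
      have : keepF (P ++ [a]) a = false := by
        obtain ⟨m, hm, hma⟩ := hdom
        have hmP : m ∈ P := ((hMmem m).mp hm).1
        have hmne : m ≠ a := fun h => haP (h ▸ hmP)
        cases h : keepF (P ++ [a]) a
        · rfl
        · rcases (keepF_iff _ _).mp h m (List.mem_append_left _ hmP) with h' | h'
          · exact absurd h' hmne
          · rw [hma] at h'; cases h'
      simp [List.filter, this, ← hD]


-- the main invariant: after processing P, A's set M is exactly the surviving elements of set(P)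
theorem main_inv (P : List (Int × Int)) :
    P.foldl minElemStep PySem.Set.empty = (PySem.Set.ofList P).filter (keepF P) := by
  induction P using List.reverseRecOn with
  | nil => rfl
  | append_singleton P a ih =>
    rw [List.foldl_append, List.foldl_cons, List.foldl_nil, ih, step_eq]

theorem min_elem_eq_filter (A : List (Int × Int)) :
    min_elem A = (PySem.Set.ofList A).filter (keepF A) := main_inv A

theorem alt_eq_filter (A : List (Int × Int)) :
    min_elem_alt A = (PySem.Set.ofList A).filter (keepF A) := by
  unfold min_elem_alt
  apply List.filter_congr
  intro a ha
  rw [Bool.eq_iff_iff]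
  simp only [Bool.not_eq_true', ← Bool.not_eq_true, List.any_eq_true, PySem.Set.mem_ofList,
    alt_eq_pyCompare, Bool.and_eq_true, decide_eq_true_eq, keepF_iff, not_exists, not_and]
  constructor
  · intro h c hc
    by_cases hca : c = a
    · exact Or.inl hca
    · have := h c hc
      cases hcc : pyCompare c a
      · exact Or.inr (by simp)
      · exact absurd hcc (by simpa [hca] using this)
  · intro h b hb hba
    rcases h b hb with h' | h'
    · exact absurd h' hba
    · exact h'

-- ===== VERDICT (by name: the statement is the Claim_ definition above) =====
theorem min_elem_spec : Claim_equal_min_elem := by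
  intro A _
  unfold Spec_min_elem
  rw [min_elem_eq_filter, alt_eq_filter]
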